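-- pv_equiv track=rewrite | github.com/BUTDRILL1/BUTLER | src/butler/agent/loop.py | _has_entity
-- ===== SOURCE A (Python) =====
-- def _has_entity(text: str) -> bool:
--     words = text.split()
--     # If any word is capitalized (excluding the first word or I)
--     if any(word.istitle() for word in words[1:] if word.lower() != 'i'):
--         return True
--     if any(char.isdigit() for char in text):
--         return True
--     # Specific known software/tech entities that users typically type in lowercase
--     tech_keywords = ['xsa', 'bert', 'roberta', 'deberta', 'llama', 'gpt', 'iphone', 'macbook', 'mba', 'bits']
--     if any(t in text.lower().split() for t in tech_keywords):
--         return True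
--     return False
-- ===== SOURCE B (Python) =====
-- def _has_entity(text: str) -> bool:
--     kw = {'xsa', 'bert', 'roberta', 'deberta', 'llama', 'gpt', 'iphone', 'macbook', 'mba', 'bits'}
--     for i, word in enumerate(text.split()):
--         if any(ch.isdigit() for ch in word):
--             return True
--         low = word.lower()
--         if i > 0 and low != 'i' and word.istitle():
--             return True
--         if low in kw:
--             return True
--     return False
-- ===== Notes on version B (the rewrite author's own statement) =====
-- stated objective: alternative
-- what changed: A makes three independent full scans (a title scan over words[1:], a digit scan over the whole text, and ten membership scans of the lowered word list, one per keyword); B is a single early-exit loop over enumerate(text.split()) that tests digits, title-case and set membership per word.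
import Mathlib
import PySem

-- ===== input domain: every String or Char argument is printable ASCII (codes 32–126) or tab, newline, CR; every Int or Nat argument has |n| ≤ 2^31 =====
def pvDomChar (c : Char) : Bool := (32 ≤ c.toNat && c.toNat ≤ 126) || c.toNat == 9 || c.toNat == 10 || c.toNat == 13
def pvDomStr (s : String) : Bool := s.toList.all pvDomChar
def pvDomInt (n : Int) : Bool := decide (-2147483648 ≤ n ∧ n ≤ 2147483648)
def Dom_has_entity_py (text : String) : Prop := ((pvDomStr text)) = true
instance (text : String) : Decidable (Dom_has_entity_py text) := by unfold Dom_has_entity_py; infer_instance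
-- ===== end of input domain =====

-- B fuses A's three independent scans of the text into one early-exit pass over the
-- enumerated word list with a set for the keyword membership (objective: alternative).

-- str.istitle() ported by hand (no PySem primitive); exact on the ASCII domain, where the
-- cased characters are exactly the letters.  State: seen = a cased char was seen,
-- prevCased = previous char was cased.
def pyIstitleGo (seen prevCased : Bool) : List Char → Bool
  | [] => seen
  | c :: rest =>
    if PySem.Chars.isupper c then
      if prevCased then false else pyIstitleGo true true rest
    else if PySem.Chars.islower c then
      if prevCased then pyIstitleGo seen true rest else false
    else pyIstitleGo seen false rest

def pyIstitle (cs : List Char) : Bool := pyIstitleGo false false cs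

-- the tech_keywords literal, shared by both ports (A keeps it as a list, B builds a set of it)
def pvTechKeywords : List (List Char) :=
  ["xsa".toList, "bert".toList, "roberta".toList, "deberta".toList, "llama".toList,
   "gpt".toList, "iphone".toList, "macbook".toList, "mba".toList, "bits".toList]

-- ===== PORT A =====
def has_entity_py (text : String) : Bool :=
  let words := PySem.Chars.split₀ text.toList
  -- any(word.istitle() for word in words[1:] if word.lower() != 'i')
  if ((PySem.List.slice words (some 1) none).filter
        (fun w => !(PySem.Chars.lower w == ['i']))).any pyIstitle then true
  -- any(char.isdigit() for char in text)
  else if text.toList.any PySem.Chars.isdigit then true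
  -- any(t in text.lower().split() for t in tech_keywords)
  else if pvTechKeywords.any
      (fun t => (PySem.Chars.split₀ (PySem.Chars.lower text.toList)).contains t) then true
  else false

-- ===== PORT B =====
-- the for-loop over enumerate(text.split()) with early return, index carried explicitly
def hasEntityLoop (kw : PySem.Set (List Char)) (i : Nat) : List (List Char) → Bool
  | [] => false
  | w :: ws =>
    if w.any PySem.Chars.isdigit then true
    else
      let low := PySem.Chars.lower w
      if decide (i > 0) && !(low == ['i']) && pyIstitle w then true
      else if kw.contains low then true
      else hasEntityLoop kw (i + 1) ws

def has_entity_py_alt (text : String) : Bool :=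
  let kw : PySem.Set (List Char) := PySem.Set.ofList pvTechKeywords
  hasEntityLoop kw 0 (PySem.Chars.split₀ text.toList)

-- ===== PRECONDITION & SPEC =====
def Spec_has_entity_py (text : String) (out : Bool) : Prop := out = has_entity_py_alt text
instance (text : String) (out : Bool) : Decidable (Spec_has_entity_py text out) := by unfold Spec_has_entity_py; infer_instance

-- ===== CLAIM (what is proved, stated in full; the proofs are below) =====
def Claim_equal_has_entity_py : Prop := ∀ (text : String), Dom_has_entity_py text → Spec_has_entity_py text (has_entity_py text)

-- ===== LEMMAS AND PROOFS =====

-- per-word predicates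
def pvDigW (w : List Char) : Bool := w.any PySem.Chars.isdigit
def pvTitW (w : List Char) : Bool := !(PySem.Chars.lower w == ['i']) && pyIstitle w
def pvKwW (w : List Char) : Bool := pvTechKeywords.contains (PySem.Chars.lower w)

-- digits survive split₀ : a predicate false on whitespace holds on some word iff it holds on some char
theorem split0_go_any (p : Char → Bool) (hp : ∀ c, PySem.Chars.isspace c = true → p c = false) :
    ∀ (s cur : List Char) (acc : List (List Char)),
      (PySem.Chars.split₀.go s cur acc).any (fun w => w.any p)
        = (acc.any (fun w => w.any p) || cur.any p || s.any p) := by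
  intro s
  induction s with
  | nil =>
    intro cur acc
    simp only [PySem.Chars.split₀.go]
    by_cases h : cur.isEmpty
    · rw [Bool.eq_iff_iff]; (simp [h, List.isEmpty_iff.mp h] <;> aesop)
    · rw [Bool.eq_iff_iff]; simp [h, List.any_reverse] <;> aesop
  | cons c rest ih =>
    intro cur acc
    simp only [PySem.Chars.split₀.go]
    by_cases hs : PySem.Chars.isspace c
    · have hpc : p c = false := hp c hs
      by_cases h : cur.isEmpty
      · rw [Bool.eq_iff_iff]; (simp [hs, h, ih, List.isEmpty_iff.mp h, hpc] <;> aesop)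
      · rw [Bool.eq_iff_iff]; (simp [hs, h, ih, List.any_reverse, hpc] <;> aesop)
    · rw [Bool.eq_iff_iff]; (simp [hs, ih] <;> aesop)

theorem split0_any (p : Char → Bool) (hp : ∀ c, PySem.Chars.isspace c = true → p c = false) (s : List Char) :
    (PySem.Chars.split₀ s).any (fun w => w.any p) = s.any p := by
  simp [PySem.Chars.split₀, split0_go_any p hp]

theorem char_le_toNat (a b : Char) : (a ≤ b) ↔ a.toNat ≤ b.toNat := by
  rw [Char.le_def, UInt32.le_iff_toNat_le]; rfl

theorem isdigit_not_space (c : Char) (h : PySem.Chars.isspace c = true) :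
    PySem.Chars.isdigit c = false := by
  simp only [PySem.Chars.isspace, Bool.or_eq_true, Bool.and_eq_true, decide_eq_true_eq] at h
  simp only [PySem.Chars.isdigit, Bool.and_eq_false_iff, decide_eq_false_iff_not, char_le_toNat]
  show ¬(48 ≤ c.toNat) ∨ ¬(c.toNat ≤ 57)
  omega

-- lowering commutes with splitting (lowerChar never creates or destroys whitespace)
theorem isspace_lowerChar (c : Char) :
    PySem.Chars.isspace (PySem.Chars.lowerChar c) = PySem.Chars.isspace c := by
  unfold PySem.Chars.lowerChar
  by_cases h : PySem.Chars.isupper c = true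
  · rw [if_pos h]
    simp only [PySem.Chars.isupper, Bool.and_eq_true, decide_eq_true_eq, char_le_toNat] at h
    have h65 : (65:Nat) ≤ c.toNat := h.1
    have h90 : c.toNat ≤ 90 := h.2
    have hv : (c.toNat + 32).isValidChar := by left; omega
    have hn : (Char.ofNat (c.toNat + 32)).toNat = c.toNat + 32 := by
      rw [Char.toNat_ofNat, if_pos hv]
    simp only [PySem.Chars.isspace, hn]
    rw [Bool.eq_iff_iff]
    simp only [Bool.or_eq_true, Bool.and_eq_true, decide_eq_true_eq]
    omega
  · rw [if_neg h]

theorem split0_go_lower :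
    ∀ (s cur : List Char) (acc : List (List Char)),
      PySem.Chars.split₀.go (PySem.Chars.lower s) (PySem.Chars.lower cur) (acc.map PySem.Chars.lower)
        = (PySem.Chars.split₀.go s cur acc).map PySem.Chars.lower := by
  intro s
  induction s with
  | nil =>
    intro cur acc
    simp only [PySem.Chars.lower, List.map_nil, PySem.Chars.split₀.go]
    by_cases h : cur.isEmpty
    · simp [h, List.isEmpty_iff.mp h]
    · have h2 : (cur.map PySem.Chars.lowerChar).isEmpty = false := by
        simp_all [List.isEmpty_iff]
      simp [h, h2, ← List.map_reverse, PySem.Chars.lower]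
  | cons c rest ih =>
    intro cur acc
    simp only [PySem.Chars.lower, List.map_cons, PySem.Chars.split₀.go] at *
    rw [isspace_lowerChar]
    by_cases hs : PySem.Chars.isspace c
    · by_cases h : cur.isEmpty
      · have := ih [] acc
        simp_all [PySem.Chars.lower]
      · have h2 : (cur.map PySem.Chars.lowerChar).isEmpty = false := by
          simp_all [List.isEmpty_iff]
        have := ih [] (cur.reverse :: acc)
        simp_all [PySem.Chars.lower, ← List.map_reverse]
    · have := ih (c :: cur) acc
      simp_all [PySem.Chars.lower]
termination_by s => s.length

theorem split0_lower (s : List Char) :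
    PySem.Chars.split₀ (PySem.Chars.lower s)
      = (PySem.Chars.split₀ s).map PySem.Chars.lower := by
  have := split0_go_lower s [] []
  simpa [PySem.Chars.split₀, PySem.Chars.lower] using this

-- A's keyword pass equals a per-word membership scan
theorem kw_swap (s : List Char) :
    pvTechKeywords.any
        (fun t => (PySem.Chars.split₀ (PySem.Chars.lower s)).contains t)
      = (PySem.Chars.split₀ s).any pvKwW := by
  rw [split0_lower, Bool.eq_iff_iff]
  simp only [pvKwW, List.any_eq_true, List.contains_eq_mem, List.mem_map, decide_eq_true_eq]
  constructor
  · rintro ⟨t, ht, w, hw, rfl⟩; exact ⟨w, hw, ht⟩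
  · rintro ⟨w, hw, h⟩; exact ⟨_, h, w, hw, rfl⟩

-- B's loop, once past the first word, is a disjunction of the three per-word tests
theorem loop_tail (i : Nat) (hi : 0 < i) (ws : List (List Char)) :
    hasEntityLoop (PySem.Set.ofList pvTechKeywords) i ws
      = ws.any (fun w => pvDigW w || pvTitW w || pvKwW w) := by
  induction ws generalizing i with
  | nil => simp [hasEntityLoop]
  | cons w ws ih =>
    simp only [hasEntityLoop, List.any_cons]
    have hkw : (PySem.Set.ofList pvTechKeywords).contains (PySem.Chars.lower w)
        = pvKwW w := by
      simp only [pvKwW, List.contains_eq_mem]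
      simp [PySem.Set.mem_ofList]
    rw [hkw, ih (i + 1) (Nat.succ_pos i)]
    simp only [pvDigW, pvTitW, decide_eq_true_eq, hi, decide_true, Bool.true_and]
    cases w.any PySem.Chars.isdigit <;>
      cases h1 : (!(PySem.Chars.lower w == ['i'])) <;>
      cases pyIstitle w <;> simp [h1]

theorem loop_head (ws : List (List Char)) :
    hasEntityLoop (PySem.Set.ofList pvTechKeywords) 0 ws
      = match ws with
        | [] => false
        | w :: ws => pvDigW w || pvKwW w || ws.any (fun w => pvDigW w || pvTitW w || pvKwW w) := by
  cases ws with
  | nil => simp [hasEntityLoop]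
  | cons w ws =>
    simp only [hasEntityLoop, loop_tail 1 Nat.one_pos]
    have hkw : (PySem.Set.ofList pvTechKeywords).contains (PySem.Chars.lower w)
        = pvKwW w := by
      simp only [pvKwW, List.contains_eq_mem]
      simp [PySem.Set.mem_ofList]
    rw [hkw]
    simp only [pvDigW, decide_eq_true_eq]
    cases w.any PySem.Chars.isdigit <;> cases pvKwW w <;> simp

-- A's first pass equals the per-word title scan over the tail
theorem title_pass (l : List (List Char)) :
    (l.filter (fun w => !(PySem.Chars.lower w == ['i']))).any pyIstitle = l.any pvTitW := by
  induction l with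
  | nil => rfl
  | cons w ws ih =>
    rw [List.filter_cons]
    by_cases h : (!(PySem.Chars.lower w == ['i'])) = true
    · simp [h, ih, pvTitW]
    · simp only [Bool.not_eq_true] at h
      simp [h, ih, pvTitW]

-- any distributes over the three-way disjunction
theorem any_or3 (ws : List (List Char)) :
    ws.any (fun w => pvDigW w || pvTitW w || pvKwW w)
      = (ws.any pvDigW || ws.any pvTitW || ws.any pvKwW) := by
  induction ws with
  | nil => rfl
  | cons w ws ih =>
    simp only [List.any_cons, ih]
    cases pvDigW w <;> cases pvTitW w <;> cases pvKwW w <;>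
      cases ws.any pvDigW <;> cases ws.any pvTitW <;> cases ws.any pvKwW <;> simp

-- the if-chain of A's three tests equals the fused disjunction (pure Boolean fact)
theorem pvIfChain : ∀ (t d1 ds k1 ks : Bool),
    (if t then true else if d1 || ds then true else if k1 || ks then true else false)
      = (d1 || k1 || (ds || t || ks)) := by decide

-- ===== VERDICT (by name: the statement is the Claim_ definition above) =====
theorem has_entity_py_spec : Claim_equal_has_entity_py := by
  intro text _
  unfold Spec_has_entity_py
  have hB : has_entity_py_alt text
      = hasEntityLoop (PySem.Set.ofList pvTechKeywords) 0 (PySem.Chars.split₀ text.toList) := rfl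
  have hA : has_entity_py text =
      (if ((PySem.List.slice (PySem.Chars.split₀ text.toList) (some 1) none).filter
            (fun w => !(PySem.Chars.lower w == ['i']))).any pyIstitle then true
       else if text.toList.any PySem.Chars.isdigit then true
       else if pvTechKeywords.any
           (fun t => (PySem.Chars.split₀ (PySem.Chars.lower text.toList)).contains t) then true
       else false) := rfl
  have hsl : PySem.List.slice (PySem.Chars.split₀ text.toList) (some 1) none
      = (PySem.Chars.split₀ text.toList).drop 1 := by
    simpa using PySem.List.slice_from (PySem.Chars.split₀ text.toList) (a := 1) (by norm_num)
  have hd : text.toList.any PySem.Chars.isdigit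
      = (PySem.Chars.split₀ text.toList).any pvDigW := by
    simpa [pvDigW] using (split0_any PySem.Chars.isdigit isdigit_not_space text.toList).symm
  rw [hB, loop_head, hA, hsl, title_pass, hd, kw_swap]
  cases PySem.Chars.split₀ text.toList with
  | nil => simp
  | cons w ws =>
    simp only [List.any_cons, List.drop_succ_cons, List.drop_zero, any_or3]
    exact pvIfChain (ws.any pvTitW) (pvDigW w) (ws.any pvDigW) (pvKwW w) (ws.any pvKwW)
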